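-- pv_equiv track=rewrite | github.com/Phabibi/Python | Assignment 6/Peer/p.py | Upperfruit
-- ===== SOURCE A (Python) =====
-- def Upperfruit(st):
--     i=0
--     n=''
--     count=0
--     while i<len(st):
--         if st[i].isalpha():
--             if st[i].isupper():
--                 n=n+len(st[i])*"orange"+" "
--                 count+=1
--         i+=1
--
--     if count==0:
--         res="No fruits available"
--     else:
--         res=n
--
--     return res
-- ===== SOURCE B (Python) =====
-- def Upperfruit(st):
--     count = sum(1 for c in st if c.isalpha() and c.isupper())
--     if count == 0:
--         return "No fruits available"
--     return "orange " * count
-- ===== Notes on version B (the rewrite author's own statement) =====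
-- stated objective: simpler
-- what changed: B only counts qualifying uppercase letters in one pass and builds the output afterwards by string repetition in closed form, instead of concatenating onto an accumulator inside an index-based while loop.
import Mathlib
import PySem

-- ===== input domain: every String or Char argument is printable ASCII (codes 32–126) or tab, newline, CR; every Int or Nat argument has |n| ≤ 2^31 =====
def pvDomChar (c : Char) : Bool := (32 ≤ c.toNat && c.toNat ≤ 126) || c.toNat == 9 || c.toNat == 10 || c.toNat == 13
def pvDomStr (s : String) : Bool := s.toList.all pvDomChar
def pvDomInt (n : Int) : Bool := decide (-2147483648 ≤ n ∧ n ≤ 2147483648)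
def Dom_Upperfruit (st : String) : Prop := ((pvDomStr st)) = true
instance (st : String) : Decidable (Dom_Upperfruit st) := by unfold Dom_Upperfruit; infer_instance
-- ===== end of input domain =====

-- B counts uppercase letters in one pass and builds 'orange ' * count afterwards (simpler decomposition); A concatenates inside the loop.

-- ===== PORT A =====
-- the while loop of A: traverses the characters in order, carrying (n, count)
def upperfruitLoop : List Char → String → Nat → String × Nat
  | [], n, count => (n, count)
  | c :: cs, n, count =>
    if PySem.Chars.isalpha c then
      if PySem.Chars.isupper c then
        upperfruitLoop cs (n ++ "orange" ++ " ") (count + 1)   -- len(st[i]) = 1, so 1*"orange" = "orange"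
      else upperfruitLoop cs n count
    else upperfruitLoop cs n count

def Upperfruit (st : String) : String :=
  let r := upperfruitLoop st.toList "" 0
  if r.2 = 0 then "No fruits available" else r.1

-- ===== PORT B =====
-- "orange " * count
def orangeRep : Nat → String
  | 0 => ""
  | k + 1 => "orange " ++ orangeRep k

def Upperfruit_alt (st : String) : String :=
  let count := (st.toList.filter (fun c => PySem.Chars.isalpha c && PySem.Chars.isupper c)).length
  if count = 0 then "No fruits available" else orangeRep count

-- ===== PRECONDITION & SPEC =====
def Spec_Upperfruit (st : String) (out : String) : Prop := out = Upperfruit_alt st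
instance (st : String) (out : String) : Decidable (Spec_Upperfruit st out) := by unfold Spec_Upperfruit; infer_instance

-- ===== CLAIM (what is proved, stated in full; the proofs are below) =====
def Claim_equal_Upperfruit : Prop := ∀ (st : String), Dom_Upperfruit st → Spec_Upperfruit st (Upperfruit st)

-- ===== LEMMAS AND PROOFS =====
theorem upperfruitLoop_eq (cs : List Char) (n : String) (count : Nat) :
    upperfruitLoop cs n count =
      (n ++ orangeRep (cs.filter (fun c => PySem.Chars.isalpha c && PySem.Chars.isupper c)).length,
       count + (cs.filter (fun c => PySem.Chars.isalpha c && PySem.Chars.isupper c)).length) := by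
  induction cs generalizing n count with
  | nil => simp [upperfruitLoop, orangeRep]
  | cons c cs ih =>
    by_cases ha : PySem.Chars.isalpha c
    · by_cases hu : PySem.Chars.isupper c
      · simp only [upperfruitLoop, ha, hu, if_true, ih, List.filter_cons, Bool.and_self,
          List.length_cons, orangeRep, Prod.mk.injEq]
        refine ⟨?_, by omega⟩
        simp only [String.append_assoc]
        congr 1
      · simp [upperfruitLoop, ha, hu, ih]
    · simp [upperfruitLoop, ha, ih]

-- ===== VERDICT (by name: the statement is the Claim_ definition above) =====
theorem Upperfruit_spec : Claim_equal_Upperfruit := by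
  intro st _
  unfold Spec_Upperfruit Upperfruit Upperfruit_alt
  rw [upperfruitLoop_eq]
  simp
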